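-- pv_equiv track=rewrite | github.com/raideno/MoLiNER | src/models/segmentation/modules/losses/standard.py | resolve_overlapping_spans
-- ===== SOURCE A (Python) =====
-- import typing
--
-- NO_CLASS_INDEX = -1
--
-- def resolve_overlapping_spans(overlapping_spans: typing.List[typing.Tuple[int, int, int]]) -> int:
--     """
--     Args:
--         overlapping_spans: List of (class_idx, span_start, span_end) tuples
--
--     Returns:
--         The winning class index (most frequent class)
--     """
--     if not overlapping_spans:
--         return NO_CLASS_INDEX
--
--     class_counts: typing.Dict[int, int] = {}
--     for class_idx, _, _ in overlapping_spans:
--         if class_idx in class_counts: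
--             class_counts[class_idx] += 1
--         else:
--             class_counts[class_idx] = 1
--
--     return max(class_counts, key=lambda k: class_counts[k], default=NO_CLASS_INDEX)
-- ===== SOURCE B (Python) =====
-- import typing
--
-- NO_CLASS_INDEX = -1
--
-- def resolve_overlapping_spans(overlapping_spans: typing.List[typing.Tuple[int, int, int]]) -> int:
--     if not overlapping_spans:
--         return NO_CLASS_INDEX
--
--     class_counts: typing.Dict[int, int] = {}
--     for class_idx, _, _ in overlapping_spans:
--         class_counts[class_idx] = class_counts.get(class_idx, 0) + 1
--
--     maxval = max(class_counts.values())
--     for class_idx, _, _ in overlapping_spans: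
--         if class_counts[class_idx] == maxval:
--             return class_idx
--     return NO_CLASS_INDEX  # unreachable
-- ===== Notes on version B (the rewrite author's own statement) =====
-- stated objective: alternative
-- what changed: Instead of a keyed max over the dict's keys, B computes the maximal count and then scans the original span list returning the first class whose count attains it, reproducing the earliest-first-occurrence tie-break by a second pass over the input.
import Mathlib
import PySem

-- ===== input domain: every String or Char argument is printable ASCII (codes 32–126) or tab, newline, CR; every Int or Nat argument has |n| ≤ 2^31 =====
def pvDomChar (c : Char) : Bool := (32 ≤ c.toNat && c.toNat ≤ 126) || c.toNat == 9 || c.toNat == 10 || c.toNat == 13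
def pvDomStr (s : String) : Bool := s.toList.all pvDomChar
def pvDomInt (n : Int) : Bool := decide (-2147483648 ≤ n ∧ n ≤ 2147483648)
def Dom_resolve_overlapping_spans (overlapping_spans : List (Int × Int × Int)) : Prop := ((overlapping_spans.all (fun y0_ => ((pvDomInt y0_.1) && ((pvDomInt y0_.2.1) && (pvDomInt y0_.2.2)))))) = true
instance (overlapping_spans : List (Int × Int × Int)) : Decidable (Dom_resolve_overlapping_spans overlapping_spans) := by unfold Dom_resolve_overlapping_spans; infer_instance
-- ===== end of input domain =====

-- B replaces A's keyed max over the dict's keys by computing the maximal count and then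
-- scanning the original span list for the first class attaining it (same earliest-first-occurrence
-- tie-break, same O(n) cost): objective 'alternative'.

-- ===== PORT A =====
def resolve_overlapping_spans (overlapping_spans : List (Int × Int × Int)) : Int :=
  if overlapping_spans = [] then -1
  else
    let class_counts : PySem.Dict Int Int :=
      overlapping_spans.foldl
        (fun d t => if d.contains t.1 then d.modify t.1 0 (· + 1) else d.insert t.1 1)
        PySem.Dict.empty
    -- max(class_counts, key=lambda k: class_counts[k], default=NO_CLASS_INDEX): every key is present,
    -- so class_counts[k] = getD k 0
    PySem.List.maxD class_counts.keys (fun k => class_counts.getD k 0) (-1)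

-- ===== PORT B =====
def resolve_overlapping_spans_alt (overlapping_spans : List (Int × Int × Int)) : Int :=
  if overlapping_spans = [] then -1
  else
    let class_counts : PySem.Dict Int Int :=
      overlapping_spans.foldl (fun d t => d.insert t.1 (d.getD t.1 0 + 1)) PySem.Dict.empty
    -- max(class_counts.values()): values is nonempty here, so the 'none' default is unreachable
    let maxval := (PySem.List.max? class_counts.values (fun v => v)).getD 0
    -- 'for class_idx, _, _ in overlapping_spans: if …: return class_idx' — first hit wins
    match overlapping_spans.find? (fun t => class_counts.getD t.1 0 == maxval) with
    | some t => t.1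
    | none => -1  -- unreachable trailing return

-- ===== PRECONDITION & SPEC =====
def Spec_resolve_overlapping_spans (overlapping_spans : List (Int × Int × Int)) (out : Int) : Prop := out = resolve_overlapping_spans_alt overlapping_spans
instance (overlapping_spans : List (Int × Int × Int)) (out : Int) : Decidable (Spec_resolve_overlapping_spans overlapping_spans out) := by unfold Spec_resolve_overlapping_spans; infer_instance

-- ===== CLAIM (what is proved, stated in full; the proofs are below) =====
def Claim_equal_resolve_overlapping_spans : Prop := ∀ (overlapping_spans : List (Int × Int × Int)), Dom_resolve_overlapping_spans overlapping_spans → Spec_resolve_overlapping_spans overlapping_spans (resolve_overlapping_spans overlapping_spans)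

-- ===== LEMMAS AND PROOFS =====

-- the one-element step of Python's max once the accumulator is set
theorem pv_foldl_some_max {α : Type} (key : α → Int) :
    ∀ (t : List α) (a : α),
      List.foldl
        (fun acc x =>
          match acc with
          | none => some x
          | some m => if key m < key x then some x else some m)
        (some a) t
      = some (t.foldl (fun m y => if key m < key y then y else m) a) := by
  intro t
  induction t with
  | nil => intro a; rfl
  | cons y t ih =>
      intro a
      simp only [List.foldl_cons]
      by_cases h : key a < key y <;> simp [h, ih]

-- the running max keeps the FIRST element attaining the overall maximum
theorem pv_runmax_first {α : Type} (key : α → Int) :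
    ∀ (t : List α) (a : α),
      t.foldl (fun m y => if key m < key y then y else m) a = a ∨
      ∃ l₁ m l₂, t = l₁ ++ m :: l₂ ∧
        t.foldl (fun m y => if key m < key y then y else m) a = m ∧
        key a < key m ∧ ∀ z ∈ l₁, key z < key m := by
  intro t
  induction t with
  | nil => intro a; exact Or.inl rfl
  | cons y t ih =>
      intro a
      by_cases h : key a < key y
      · rcases ih y with h1 | ⟨l₁, m, l₂, ht, hres, hlt, hall⟩
        · exact Or.inr ⟨[], y, t, rfl, by simp [List.foldl_cons, h, h1], h, by simp⟩
        · refine Or.inr ⟨y :: l₁, m, l₂, by simp [ht], by simp [List.foldl_cons, h, hres], lt_trans h hlt, ?_⟩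
          intro z hz
          rcases List.mem_cons.mp hz with hz | hz
          · exact hz ▸ hlt
          · exact hall z hz
      · rcases ih a with h1 | ⟨l₁, m, l₂, ht, hres, hlt, hall⟩
        · exact Or.inl (by simp [List.foldl_cons, h, h1])
        · refine Or.inr ⟨y :: l₁, m, l₂, by simp [ht], by simp [List.foldl_cons, h, hres], hlt, ?_⟩
          intro z hz
          rcases List.mem_cons.mp hz with hz | hz
          · exact hz ▸ lt_of_le_of_lt (not_lt.mp h) hlt
          · exact hall z hz

-- Python's max returns the first element attaining the maximum key
theorem pv_max?_first {α : Type} (key : α → Int) {l : List α} {m : α}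
    (h : PySem.List.max? l key = some m) :
    ∃ l₁ l₂, l = l₁ ++ m :: l₂ ∧ ∀ z ∈ l₁, key z < key m := by
  cases l with
  | nil => simp [PySem.List.max?] at h
  | cons x t =>
      have h' : some (t.foldl (fun m y => if key m < key y then y else m) x) = some m := by
        rw [← pv_foldl_some_max key t x]
        simpa [PySem.List.max?, List.foldl_cons] using h
      have hres := Option.some.inj h'
      rcases pv_runmax_first key t x with h1 | ⟨l₁, m', l₂, ht, hres', hlt, hall⟩
      · exact ⟨[], t, by rw [h1] at hres; rw [hres]; simp, by simp⟩
      · rw [hres'] at hres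
        subst hres
        refine ⟨x :: l₁, l₂, by simp [ht], ?_⟩
        intro z hz
        rcases List.mem_cons.mp hz with hz | hz
        · exact hz ▸ hlt
        · exact hall z hz

-- find? skips an element the predicate rejects, wherever discard removed it
theorem pv_find?_discard {α : Type} [BEq α] [LawfulBEq α] (p : α → Bool) (x : α)
    (hx : p x = false) : ∀ (s : List α), (PySem.Set.discard s x).find? p = s.find? p := by
  intro s
  induction s with
  | nil => rfl
  | cons y s ih =>
      by_cases hyx : y = x
      · subst hyx
        simp [PySem.Set.discard, hx] at *
        exact ih
      · have : (y == x) = false := beq_eq_false_iff_ne.mpr hyx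
        simp only [PySem.Set.discard, List.filter_cons, this, Bool.not_false, if_pos] at *
        cases hpy : p y <;> simp [hpy, ih]

-- first match in set(xs) (first-insertion order) = first match in xs
theorem pv_find?_ofList {α : Type} [BEq α] [LawfulBEq α] (p : α → Bool) :
    ∀ (s : List α), (PySem.Set.ofList s).find? p = s.find? p := by
  intro s
  induction s with
  | nil => rfl
  | cons x s ih =>
      rw [PySem.Set.ofList_cons]
      cases hpx : p x
      · simp only [List.find?_cons, hpx]
        rw [pv_find?_discard p x hpx, ih]
      · simp [hpx]

-- find? on an explicit split whose prefix is all-rejected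
theorem pv_find?_split {α : Type} (p : α → Bool) (l₁ l₂ : List α) (m : α)
    (h₁ : ∀ z ∈ l₁, p z = false) (hm : p m = true) :
    (l₁ ++ m :: l₂).find? p = some m := by
  induction l₁ with
  | nil => simp [hm]
  | cons z l₁ ih =>
      have hz : p z = false := h₁ z (by simp)
      simp only [List.cons_append, List.find?_cons, hz]
      exact ih (fun w hw => h₁ w (by simp [hw]))

-- ===== VERDICT (by name: the statement is the Claim_ definition above) =====
theorem resolve_overlapping_spans_spec : Claim_equal_resolve_overlapping_spans := by
  intro spans _
  unfold Spec_resolve_overlapping_spans resolve_overlapping_spans resolve_overlapping_spans_alt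
  by_cases hnil : spans = []
  · simp [hnil]
  · simp only [if_neg hnil]
    -- both dicts are counter of the class list
    set cs : List Int := spans.map (·.1) with hcs
    have hA : spans.foldl
        (fun d t => if d.contains t.1 then d.modify t.1 0 (· + 1) else d.insert t.1 1)
        PySem.Dict.empty = PySem.Dict.counter cs := by
      have h0 : List.foldl
          (fun (d : PySem.Dict Int Int) (x : Int) =>
            if d.contains x then d.modify x 0 (· + 1) else d.insert x 1)
          PySem.Dict.empty cs = PySem.Dict.counter cs := by
        rw [PySem.Dict.counter_eq_foldl]
        refine PySem.List.foldl_congr_mem cs _ _ PySem.Dict.empty ?_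
        intro d x _
        by_cases hc : d.contains x = true
        · simp [hc]
        · simp only [Bool.not_eq_true] at hc
          simp only [hc, PySem.Dict.modify, if_false, Bool.false_eq_true]
          rw [PySem.Dict.getD_of_not_contains d 0 hc]
          norm_num
      rw [hcs, List.foldl_map] at h0
      exact h0
    have hB : spans.foldl (fun d t => d.insert t.1 (d.getD t.1 0 + 1))
        PySem.Dict.empty = PySem.Dict.counter cs := by
      have h0 := PySem.Dict.foldl_insert_getD_add_one_eq_counter cs
      rw [hcs, List.foldl_map] at h0
      exact h0
    rw [hA, hB]
    -- key function is the count
    have hkey : (fun k => (PySem.Dict.counter cs).getD k 0)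
        = fun k : Int => ((cs.count k : Int)) := funext fun k => PySem.Dict.getD_counter cs k
    have hcsne : cs ≠ [] := by
      intro hceq
      exact hnil (List.map_eq_nil_iff.mp (hcs ▸ hceq))
    have hSne : PySem.Set.ofList cs ≠ [] := by
      obtain ⟨c, cr, hccr⟩ := List.exists_cons_of_ne_nil hcsne
      exact List.ne_nil_of_mem ((PySem.Set.mem_ofList cs c).mpr (by rw [hccr]; simp))
    -- the maximiser m picked by A
    obtain ⟨m, hm⟩ : ∃ m, PySem.List.max? (PySem.Set.ofList cs)
        (fun k : Int => ((cs.count k : Int))) = some m := by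
      cases hmq : PySem.List.max? (PySem.Set.ofList cs) (fun k : Int => ((cs.count k : Int))) with
      | none => exact absurd ((PySem.List.max?_eq_none_iff _ _).mp hmq) hSne
      | some m => exact ⟨m, rfl⟩
    have hmmemS : m ∈ PySem.Set.ofList cs := PySem.List.max?_mem hm
    have hmmem : m ∈ cs := (PySem.Set.mem_ofList _ _).mp hmmemS
    have hmax : ∀ y ∈ cs, (cs.count y : Int) ≤ (cs.count m : Int) := by
      intro y hy
      exact PySem.List.max?_isMax hm y ((PySem.Set.mem_ofList _ _).mpr hy)
    obtain ⟨l₁, l₂, hsplit, hbefore⟩ := pv_max?_first _ hm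
    -- A's result is m
    have hAres : PySem.List.maxD (PySem.Dict.counter cs).keys
        (fun k => (PySem.Dict.counter cs).getD k 0) (-1) = m := by
      rw [PySem.Dict.keys_counter, hkey, PySem.List.maxD, hm]; rfl
    -- maxval is count m
    have hvals : (PySem.Dict.counter cs).values
        = (PySem.Set.ofList cs).map (fun k : Int => ((cs.count k : Int))) := by
      show ((PySem.Dict.counter cs).items).map (·.2) = _
      rw [PySem.Dict.items_counter, List.map_map]; rfl
    have hmaxval : (PySem.List.max? (PySem.Dict.counter cs).values (fun v => v)).getD 0
        = (cs.count m : Int) := by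
      rw [hvals]
      cases hmv : PySem.List.max? ((PySem.Set.ofList cs).map fun k : Int => ((cs.count k : Int)))
          (fun v => v) with
      | none =>
          exfalso
          have hemp := (PySem.List.max?_eq_none_iff _ _).mp hmv
          exact hSne (List.map_eq_nil_iff.mp hemp)
      | some v =>
          obtain ⟨y, hyS, hyv⟩ := List.mem_map.mp (PySem.List.max?_mem hmv)
          have hvle : v ≤ (cs.count m : Int) := hyv ▸ hmax y ((PySem.Set.mem_ofList _ _).mp hyS)
          have hlev : (cs.count m : Int) ≤ v :=
            PySem.List.max?_isMax hmv _ (List.mem_map.mpr ⟨m, hmmemS, rfl⟩)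
          simpa using le_antisymm hvle hlev
    rw [hmaxval, hAres]
    -- the find? loop returns m
    have hfindS : (PySem.Set.ofList cs).find?
        (fun c : Int => ((cs.count c : Int) == (cs.count m : Int))) = some m := by
      rw [hsplit]
      refine pv_find?_split _ l₁ l₂ m ?_ (by simp)
      intro z hz
      have := hbefore z hz
      simpa using ne_of_lt this
    have hfindcs : cs.find? (fun c : Int => ((cs.count c : Int) == (cs.count m : Int))) = some m := by
      rw [← pv_find?_ofList, hfindS]
    -- rewrite the predicate via getD_counter and relate to cs
    have hpred : (fun t : Int × Int × Int =>
        ((PySem.Dict.counter cs).getD t.1 0 == (cs.count m : Int)))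
        = fun t : Int × Int × Int => ((cs.count t.1 : Int) == (cs.count m : Int)) :=
      funext fun t => by rw [PySem.Dict.getD_counter]
    rw [hpred]
    have hmapfind : cs.find? (fun c : Int => ((cs.count c : Int) == (cs.count m : Int)))
        = (spans.find? (fun t : Int × Int × Int =>
            ((cs.count t.1 : Int) == (cs.count m : Int)))).map (·.1) := by
      rw [hcs, List.find?_map]; rfl
    rw [hfindcs] at hmapfind
    cases hsf : spans.find? (fun t : Int × Int × Int =>
        ((cs.count t.1 : Int) == (cs.count m : Int))) with
    | none => rw [hsf] at hmapfind; simp at hmapfind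
    | some t0 =>
        rw [hsf] at hmapfind
        simp only [Option.map_some] at hmapfind
        simp [Option.some.inj hmapfind]
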